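-- pv_equiv track=rewrite | github.com/TT-392/kicad_multiedit | newsrc/gui/wxwidgets/tab_completion_test.py | __extract_beginning_of_word
-- ===== SOURCE A (Python) =====
-- def __extract_beginning_of_word(inp, cursor_position):
--     chars_at_start_of_completable_term = \
--     [' ', '\n', '\t', '\r', '\v', '\f', '\0', '+', '-', '*', '/', '%', '&', '|', '^', ',', ';', ':', ']', ')', '}', '<', '>', '=', '@', '#', '~', '(', '[', '{', None]
--
--     retval = inp[:cursor_position]
--
--     for i in range(len(retval) - 1, -1, -1):
--         if retval[i] in chars_at_start_of_completable_term:
--             retval = retval[i + 1:]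
--             break
--
--     return retval
-- ===== SOURCE B (Python) =====
-- DELIMS = ' \n\t\r\v\f\0+-*/%&|^,;:])}<>=@#~([{'
--
-- def __extract_beginning_of_word(inp, cursor_position):
--     prefix = inp[:cursor_position]
--     seg_start = 0
--     for i, ch in enumerate(prefix):
--         if ch in DELIMS:
--             seg_start = i + 1
--     return prefix[seg_start:]
-- ===== Notes on version B (the rewrite author's own statement) =====
-- stated objective: alternative
-- what changed: Replaces A's backward index scan with early break (repeatedly indexing and slicing retval) by a single forward pass over enumerate(prefix) that tracks the start index of the current segment (last delimiter position + 1) and slices once at the end.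
import Mathlib
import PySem

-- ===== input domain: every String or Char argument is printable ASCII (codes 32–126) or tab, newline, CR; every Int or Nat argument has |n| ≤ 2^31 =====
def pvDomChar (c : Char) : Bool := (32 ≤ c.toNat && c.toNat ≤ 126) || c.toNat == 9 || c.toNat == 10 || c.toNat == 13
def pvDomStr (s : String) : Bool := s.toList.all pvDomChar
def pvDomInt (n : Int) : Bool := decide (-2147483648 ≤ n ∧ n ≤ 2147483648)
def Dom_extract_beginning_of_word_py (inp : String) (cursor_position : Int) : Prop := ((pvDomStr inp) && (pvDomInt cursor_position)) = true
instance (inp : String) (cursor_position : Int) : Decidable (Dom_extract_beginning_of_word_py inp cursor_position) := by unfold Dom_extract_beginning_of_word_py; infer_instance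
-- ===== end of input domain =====

-- B replaces A's backward index scan with early break by a single forward pass tracking
-- the start of the current segment (last delimiter + 1), sliced once at the end (alternative).

-- ===== PORT A =====
-- the delimiter characters (Python's list also contains None, which a character can never equal,
-- so it is dropped from the char list)
def pvDelims : List Char :=
  [' ', '\n', '\t', '\r', '\x0B', '\x0C', '\x00', '+', '-', '*', '/', '%', '&', '|', '^',
   ',', ';', ':', ']', ')', '}', '<', '>', '=', '@', '#', '~', '(', '[', '{']

-- the backward for-loop: fuel k+1 means the loop is at index k (range(len-1, -1, -1));
-- on a delimiter it returns retval[i+1:] (the break), otherwise continues downward.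
def pvScanA (s : List Char) : Nat → List Char
  | 0 => s
  | k + 1 => if pvDelims.contains (s.getD k ' ') then s.drop (k + 1) else pvScanA s k

def extract_beginning_of_word_py (inp : String) (cursor_position : Int) : String :=
  let retval := PySem.Str.slice inp none (some cursor_position)
  String.ofList (pvScanA retval.toList retval.toList.length)

-- ===== PORT B =====
-- the forward for-loop computing seg_start (last delimiter index + 1, else 0)
def pvSegIdx (s : List Char) : Int :=
  (PySem.List.enumerate s 0).foldl
    (fun acc p => if pvDelims.contains p.2 then p.1 + 1 else acc) 0

def extract_beginning_of_word_py_alt (inp : String) (cursor_position : Int) : String :=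
  let pre := PySem.Str.slice inp none (some cursor_position)
  String.ofList (PySem.List.slice pre.toList (some (pvSegIdx pre.toList)) none)

-- ===== PRECONDITION & SPEC =====
def Spec_extract_beginning_of_word_py (inp : String) (cursor_position : Int) (out : String) : Prop := out = extract_beginning_of_word_py_alt inp cursor_position
instance (inp : String) (cursor_position : Int) (out : String) : Decidable (Spec_extract_beginning_of_word_py inp cursor_position out) := by unfold Spec_extract_beginning_of_word_py; infer_instance

-- ===== CLAIM (what is proved, stated in full; the proofs are below) =====
def Claim_equal_extract_beginning_of_word_py : Prop := ∀ (inp : String) (cursor_position : Int), Dom_extract_beginning_of_word_py inp cursor_position → Spec_extract_beginning_of_word_py inp cursor_position (extract_beginning_of_word_py inp cursor_position)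

-- ===== LEMMAS AND PROOFS =====

theorem pvSegIdx_concat (t : List Char) (c : Char) :
    pvSegIdx (t ++ [c]) = if pvDelims.contains c then (t.length : Int) + 1 else pvSegIdx t := by
  unfold pvSegIdx
  rw [PySem.List.enumerate_append, List.foldl_append]
  simp

theorem pvSegIdx_bounds (s : List Char) : 0 ≤ pvSegIdx s ∧ pvSegIdx s ≤ s.length := by
  induction s using List.reverseRecOn with
  | nil => simp [pvSegIdx, PySem.List.enumerate]
  | append_singleton t c ih =>
      rw [pvSegIdx_concat]
      simp only [List.length_append, List.length_singleton]
      split <;> push_cast <;> omega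

theorem pvScanA_concat_of_le (t : List Char) (c : Char) :
    ∀ k, k ≤ t.length → pvScanA (t ++ [c]) k = pvScanA t k ++ [c] := by
  intro k
  induction k with
  | zero => intro _; simp [pvScanA]
  | succ j ih =>
      intro hj
      have hjlt : j < t.length := by omega
      have hget : (t ++ [c]).getD j ' ' = t.getD j ' ' := by
        simp [List.getD, List.getElem?_append_left hjlt]
      simp only [pvScanA, hget]
      split
      · rw [List.drop_append_of_le_length (by omega)]
      · exact ih (by omega)

theorem pvScanA_eq_drop_segIdx (s : List Char) :
    pvScanA s s.length = s.drop (pvSegIdx s).toNat := by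
  induction s using List.reverseRecOn with
  | nil => simp [pvScanA, pvSegIdx, PySem.List.enumerate]
  | append_singleton t c ih =>
      have hlen : (t ++ [c]).length = t.length + 1 := by simp
      rw [hlen, pvSegIdx_concat]
      have hget : (t ++ [c]).getD t.length ' ' = c := by
        simp [List.getD]
      simp only [pvScanA, hget]
      split
      · next h =>
          have h1 : ((t.length : Int) + 1).toNat = t.length + 1 := by omega
          simp [h1]
      · next h =>
          obtain ⟨h0, hle⟩ := pvSegIdx_bounds t
          have hleN : (pvSegIdx t).toNat ≤ t.length := by omega
          rw [pvScanA_concat_of_le t c t.length le_rfl, ih,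
            List.drop_append_of_le_length hleN]

-- ===== VERDICT (by name: the statement is the Claim_ definition above) =====
theorem extract_beginning_of_word_py_spec : Claim_equal_extract_beginning_of_word_py := by
  intro inp cursor_position _
  unfold Spec_extract_beginning_of_word_py extract_beginning_of_word_py extract_beginning_of_word_py_alt
  simp only
  set l := (PySem.Str.slice inp none (some cursor_position)).toList with hl
  rw [PySem.List.slice_from l (pvSegIdx_bounds l).1]
  exact congrArg String.ofList (pvScanA_eq_drop_segIdx l)
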